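-- pv_equiv track=rewrite | github.com/practual/cartographers | game.py | shoreside_expanse
-- ===== SOURCE A (Python) =====
-- def _make_coord_adjacents(coord):
--     adjacents = set()
--     x, y = coord
--     if x > 0:
--         adjacents.add((x - 1, y))
--     if y > 0:
--         adjacents.add((x, y - 1))
--     if x < 10:
--         adjacents.add((x + 1, y))
--     if y < 10:
--         adjacents.add((x, y + 1))
--     return adjacents
--
-- def _shoreside_expanse_check_cluster(terrain_type, coords_to_terrain, coord, checked_coords):
--     opposite_terrain = 'water' if terrain_type == 'farm' else 'farm'
--     adjacent_coords = _make_coord_adjacents(coord)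
--     if len(adjacent_coords) < 4:
--         # On the edge of the map
--         return False
--     not_touching_opposite = True
--     for adjacent in adjacent_coords:
--         if adjacent in checked_coords or adjacent not in coords_to_terrain:
--             continue
--         checked_coords.add(adjacent)
--         if coords_to_terrain[adjacent] == opposite_terrain:
--             return False
--         if coords_to_terrain[adjacent] == terrain_type:
--             not_touching_opposite = (
--                 not_touching_opposite and
--                 _shoreside_expanse_check_cluster(terrain_type, coords_to_terrain, adjacent, checked_coords)
--             )
--     return not_touching_opposite
--
-- def shoreside_expanse(coords_to_terrain, terrain_to_coords):
--     score = 0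
--     checked_coords = set()
--     for water_space in terrain_to_coords['water']:
--         if water_space in checked_coords:
--             continue
--         if _shoreside_expanse_check_cluster('water', coords_to_terrain, water_space, checked_coords):
--             score += 3
--     checked_coords = set()
--     for farm_space in terrain_to_coords['farm']:
--         if farm_space in checked_coords:
--             continue
--         if _shoreside_expanse_check_cluster('farm', coords_to_terrain, farm_space, checked_coords):
--             score += 3
--     return score
-- ===== SOURCE B (Python) =====
-- # Same scoring semantics as A, restructured: no recursion and no boolean-returning
-- # helper; a single phase loop drives an explicit frame-stack machine in which each
-- # frame is the list of still-unprocessed neighbours of one cluster cell and a single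
-- # propagated flag replaces A's per-call 'not_touching_opposite' plumbing.
--
-- def _neighbour_set(coord):
--     nbrs = set()
--     x, y = coord
--     if x > 0:
--         nbrs.add((x - 1, y))
--     if y > 0:
--         nbrs.add((x, y - 1))
--     if x < 10:
--         nbrs.add((x + 1, y))
--     if y < 10:
--         nbrs.add((x, y + 1))
--     return nbrs
--
--
-- def shoreside_expanse(coords_to_terrain, terrain_to_coords):
--     score = 0
--     for terrain, opposite in (('water', 'farm'), ('farm', 'water')):
--         checked = set()
--         for seed in terrain_to_coords[terrain]:
--             if seed in checked:
--                 continue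
--             seed_nbrs = _neighbour_set(seed)
--             if len(seed_nbrs) < 4:
--                 continue  # seed on the map edge: cluster cannot score
--             stack = [list(seed_nbrs)]
--             flag = True  # 'no opposite terrain touched so far' for the open frames
--             verdict = None
--             while verdict is None:
--                 frame = stack[-1]
--                 if not frame:
--                     stack.pop()
--                     if not stack:
--                         verdict = flag
--                     continue
--                 cell = frame.pop(0)
--                 if cell in checked or cell not in coords_to_terrain:
--                     continue
--                 checked.add(cell)
--                 terr = coords_to_terrain[cell]
--                 if terr == opposite:
--                     stack.pop()  # abandon this frame entirely
--                     if not stack: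
--                         verdict = False
--                     else:
--                         flag = False
--                 elif terr == terrain and flag:
--                     cell_nbrs = _neighbour_set(cell)
--                     if len(cell_nbrs) < 4:
--                         flag = False  # cluster reaches the map edge
--                     else:
--                         stack.append(list(cell_nbrs))
--             if verdict:
--                 score += 3
--     return score
-- ===== Notes on version B (the rewrite author's own statement) =====
-- stated objective: alternative
-- what changed: Same traversal semantics, but the recursive boolean-returning cluster check with its per-call 'not_touching_opposite' plumbing is replaced by a single iterative frame-stack machine (one list of pending neighbours per open cell, one propagated flag), and A's two copied phase loops become one data-driven loop over (terrain, opposite) pairs.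
import Mathlib
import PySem

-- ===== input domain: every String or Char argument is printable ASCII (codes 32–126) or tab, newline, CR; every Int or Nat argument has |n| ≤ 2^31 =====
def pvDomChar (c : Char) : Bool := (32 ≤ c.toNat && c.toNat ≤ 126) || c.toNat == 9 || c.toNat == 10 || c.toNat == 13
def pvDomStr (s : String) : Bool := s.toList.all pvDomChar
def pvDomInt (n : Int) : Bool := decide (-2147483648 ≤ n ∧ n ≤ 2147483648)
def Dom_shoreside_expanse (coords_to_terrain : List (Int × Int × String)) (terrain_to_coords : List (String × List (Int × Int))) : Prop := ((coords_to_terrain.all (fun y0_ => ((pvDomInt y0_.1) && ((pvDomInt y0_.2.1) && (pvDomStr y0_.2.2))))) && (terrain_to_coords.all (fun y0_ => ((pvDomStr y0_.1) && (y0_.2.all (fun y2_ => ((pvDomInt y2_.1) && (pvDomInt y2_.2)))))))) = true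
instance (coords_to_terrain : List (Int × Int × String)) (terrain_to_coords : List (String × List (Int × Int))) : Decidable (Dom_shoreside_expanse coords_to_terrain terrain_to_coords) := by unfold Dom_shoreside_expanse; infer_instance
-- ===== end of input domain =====

-- B keeps A's scoring semantics exactly but restructures it: the recursive,
-- boolean-returning cluster check with its per-call 'not_touching_opposite'
-- plumbing becomes a single iterative frame-stack machine with one propagated
-- flag, and the two copied phase loops become one data-driven loop; objective:
-- alternative (same cost).

-- ===== SHARED HELPER: the two Python argument dicts, and the neighbour SET =====
-- the coords_to_terrain dict
def pvCoordDict (coords_to_terrain : List (Int × Int × String)) : PySem.Dict (Int × Int) String :=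
  PySem.Dict.ofList (coords_to_terrain.map (fun p => ((p.1, p.2.1), p.2.2)))

-- A's _make_coord_adjacents and B's _neighbour_set are the same Python code: a
-- CPython `set` of at most 4 int pairs, ITERATED by both programs.  Both ports
-- therefore share this helper, which reproduces CPython's hash-table iteration
-- order exactly (64-bit xxHash-style tuple hash, 8-slot open-addressed table,
-- slots read in ascending order); it is exact for |coordinates| ≤ 2^31 + 1.
def pvHashInt (n : Int) : UInt64 :=
  -- CPython hash(int) for |n| < 2^61 - 1: n itself, except hash(-1) = -2
  UInt64.ofNat (((if n = -1 then -2 else n) % (18446744073709551616 : Int)).toNat)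

def pvTupleHash (a b : Int) : UInt64 :=
  -- CPython tuple hash (xxHash64 combination), length 2
  let acc : UInt64 := 2870177450012600261
  let acc := (((acc + pvHashInt a * 14029467366897019727) <<< 31) |||
              ((acc + pvHashInt a * 14029467366897019727) >>> 33)) * 11400714785074694791
  let acc := (((acc + pvHashInt b * 14029467366897019727) <<< 31) |||
              ((acc + pvHashInt b * 14029467366897019727) >>> 33)) * 11400714785074694791
  let acc := acc + (2 ^^^ (2870177450012600261 ^^^ 3527539))
  if acc == 18446744073709551615 then 1546275796 else acc

-- CPython set_add_entry probing on an 8-slot table (mask 7, PERTURB_SHIFT 5;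
-- the LINEAR_PROBES block never runs on a table this small); the probe always
-- finds a free slot among 8 long before 64 steps
def pvProbeIns (tbl : List (Option (Int × Int))) (c : Int × Int) :
    Nat → UInt64 → UInt64 → List (Option (Int × Int))
  | 0, _, _ => tbl
  | fuel + 1, i, perturb =>
    match tbl.getD i.toNat none with
    | none => tbl.set i.toNat (some c)
    | some _ =>
      let p2 := perturb >>> 5
      pvProbeIns tbl c fuel ((i * 5 + 1 + p2) &&& 7) p2

def pvInsertSlot (tbl : List (Option (Int × Int))) (c : Int × Int) : List (Option (Int × Int)) :=
  pvProbeIns tbl c 64 (pvTupleHash c.1 c.2 &&& 7) (pvTupleHash c.1 c.2)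

-- the set {(x-1,y)?, (x,y-1)?, (x+1,y)?, (x,y+1)?} in CPython iteration order
def pvAdj (c : Int × Int) : List (Int × Int) :=
  let adds :=
    (if c.1 > 0 then [(c.1 - 1, c.2)] else []) ++
    (if c.2 > 0 then [(c.1, c.2 - 1)] else []) ++
    (if c.1 < 10 then [(c.1 + 1, c.2)] else []) ++
    (if c.2 < 10 then [(c.1, c.2 + 1)] else [])
  (adds.foldl pvInsertSlot (List.replicate 8 none)).filterMap id

-- ===== PORT A =====
-- _shoreside_expanse_check_cluster: the recursion runs on explicit fuel (the
-- Python recursion terminates: every recursive call first marks a fresh dict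
-- key; the wrapper's fuel 10*size+20 is proved sufficient below)
mutual
def pvCheckA? (fuel : Nat) (t : String) (D : PySem.Dict (Int × Int) String)
    (coord : Int × Int) (checked : PySem.Set (Int × Int)) :
    Option (Bool × PySem.Set (Int × Int)) :=
  match fuel with
  | 0 => none
  | f + 1 =>
    let adjacent_coords := pvAdj coord
    if adjacent_coords.length < 4 then some (false, checked)  -- on the edge of the map
    else pvLoopA? f t D adjacent_coords true checked

def pvLoopA? (fuel : Nat) (t : String) (D : PySem.Dict (Int × Int) String)
    (adjs : List (Int × Int)) (nt : Bool) (checked : PySem.Set (Int × Int)) :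
    Option (Bool × PySem.Set (Int × Int)) :=
  match fuel with
  | 0 => none
  | f + 1 =>
    let opp := if t == "farm" then "water" else "farm"
    match adjs with
    | [] => some (nt, checked)
    | a :: rest =>
      if PySem.Set.contains checked a || !(D.contains a) then
        pvLoopA? f t D rest nt checked
      else
        let checked2 := PySem.Set.add checked a
        if D.getD a "" == opp then some (false, checked2)
        else if D.getD a "" == t then
          if nt then
            -- 'nt and _check(...)': the call happens only while nt is True
            match pvCheckA? f t D a checked2 with
            | none => none
            | some (v, c3) => pvLoopA? f t D rest v c3
          else pvLoopA? f t D rest nt checked2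
        else pvLoopA? f t D rest nt checked2
end

def shoreside_expanse (coords_to_terrain : List (Int × Int × String)) (terrain_to_coords : List (String × List (Int × Int))) : Int :=
  let coords := pvCoordDict coords_to_terrain
  let T : PySem.Dict String (List (Int × Int)) := PySem.Dict.ofList terrain_to_coords
  let fuel := 10 * coords.size + 20
  let st1 := ((T.get? "water").getD []).foldl
    (fun (st : Int × PySem.Set (Int × Int)) ws =>
      if PySem.Set.contains st.2 ws then st
      else match pvCheckA? fuel "water" coords ws st.2 with
           | none => st  -- fuel guard, proved unreachable
           | some (v, c2) => (st.1 + (if v then 3 else 0), c2))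
    (0, PySem.Set.empty)
  let st2 := ((T.get? "farm").getD []).foldl
    (fun (st : Int × PySem.Set (Int × Int)) fs =>
      if PySem.Set.contains st.2 fs then st
      else match pvCheckA? fuel "farm" coords fs st.2 with
           | none => st  -- fuel guard, proved unreachable
           | some (v, c2) => (st.1 + (if v then 3 else 0), c2))
    (st1.1, PySem.Set.empty)
  st2.1

-- ===== PORT B =====
-- the while-loop of Source B: one frame per open cluster cell (its not-yet-processed
-- neighbours, consumed from the front), `top.2` is the propagated flag; runs on
-- fuel (proved sufficient below)
def pvRunB? (fuel : Nat) (terrain opp : String) (D : PySem.Dict (Int × Int) String)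
    (top : List (Int × Int) × Bool) (stk : List (List (Int × Int)))
    (checked : PySem.Set (Int × Int)) : Option (Bool × PySem.Set (Int × Int)) :=
  match fuel with
  | 0 => none
  | f + 1 =>
    match top.1 with
    | [] =>
      match stk with
      | [] => some (top.2, checked)          -- last frame closed: verdict = flag
      | p :: k => pvRunB? f terrain opp D (p, top.2) k checked
    | cell :: rest =>
      if PySem.Set.contains checked cell || !(D.contains cell) then
        pvRunB? f terrain opp D (rest, top.2) stk checked
      else
        let checked2 := PySem.Set.add checked cell
        if D.getD cell "" == opp then
          match stk with                      -- abandon this frame entirely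
          | [] => some (false, checked2)
          | p :: k => pvRunB? f terrain opp D (p, false) k checked2
        else if D.getD cell "" == terrain && top.2 then
          let cell_nbrs := pvAdj cell
          if cell_nbrs.length < 4 then
            pvRunB? f terrain opp D (rest, false) stk checked2  -- cluster reaches the edge
          else
            pvRunB? f terrain opp D (cell_nbrs, true) (rest :: stk) checked2
        else pvRunB? f terrain opp D (rest, top.2) stk checked2

def shoreside_expanse_alt (coords_to_terrain : List (Int × Int × String)) (terrain_to_coords : List (String × List (Int × Int))) : Int :=
  let coords := pvCoordDict coords_to_terrain
  let T : PySem.Dict String (List (Int × Int)) := PySem.Dict.ofList terrain_to_coords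
  let fuel := 10 * coords.size + 20
  (([("water", "farm"), ("farm", "water")] : List (String × String)).foldl
    (fun score p =>
      (((T.get? p.1).getD []).foldl
        (fun (st : Int × PySem.Set (Int × Int)) seed =>
          if PySem.Set.contains st.2 seed then st
          else
            let seed_nbrs := pvAdj seed
            if seed_nbrs.length < 4 then st  -- seed on the map edge
            else match pvRunB? fuel p.1 p.2 coords (seed_nbrs, true) [] st.2 with
                 | none => st  -- fuel guard, proved unreachable
                 | some (v, c2) => (st.1 + (if v then 3 else 0), c2))
        (score, PySem.Set.empty)).1)
    0)

-- ===== PRECONDITION & SPEC =====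
-- Pre_ excludes exactly the inputs on which the Python A raises: a KeyError
-- when 'water' or 'farm' is missing from terrain_to_coords (B raises there too).
def Pre_shoreside_expanse (coords_to_terrain : List (Int × Int × String)) (terrain_to_coords : List (String × List (Int × Int))) : Prop :=
  (((PySem.Dict.ofList terrain_to_coords : PySem.Dict String (List (Int × Int))).get? "water").isSome &&
   ((PySem.Dict.ofList terrain_to_coords : PySem.Dict String (List (Int × Int))).get? "farm").isSome) = true

instance (coords_to_terrain : List (Int × Int × String)) (terrain_to_coords : List (String × List (Int × Int))) : Decidable (Pre_shoreside_expanse coords_to_terrain terrain_to_coords) := by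
  unfold Pre_shoreside_expanse; infer_instance

def pvWitness_shoreside_expanse : (List (Int × Int × String)) × (List (String × List (Int × Int))) :=
  ([(5, 5, "water"), (5, 6, "water"), (5, 4, "farm"), (2, 2, "farm")],
   [("water", [(5, 5), (5, 6)]), ("farm", [(5, 4), (2, 2)])])

def Spec_shoreside_expanse (coords_to_terrain : List (Int × Int × String)) (terrain_to_coords : List (String × List (Int × Int))) (out : Int) : Prop := out = shoreside_expanse_alt coords_to_terrain terrain_to_coords
instance (coords_to_terrain : List (Int × Int × String)) (terrain_to_coords : List (String × List (Int × Int))) (out : Int) : Decidable (Spec_shoreside_expanse coords_to_terrain terrain_to_coords out) := by unfold Spec_shoreside_expanse; infer_instance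

-- ===== CLAIM (what is proved, stated in full; the proofs are below) =====
def Claim_equal_shoreside_expanse : Prop := ∀ (coords_to_terrain : List (Int × Int × String)) (terrain_to_coords : List (String × List (Int × Int))), Dom_shoreside_expanse coords_to_terrain terrain_to_coords → Pre_shoreside_expanse coords_to_terrain terrain_to_coords → Spec_shoreside_expanse coords_to_terrain terrain_to_coords (shoreside_expanse coords_to_terrain terrain_to_coords)

-- ===== LEMMAS AND PROOFS =====

-- ---- counting the not-yet-marked dict keys (the fuel measure) ----
def pvUnvis (l : List (Int × Int)) (V : PySem.Set (Int × Int)) : Nat :=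
  (l.filter (fun k => !(PySem.Set.contains V k))).length

theorem pvUnvis_le (l : List (Int × Int)) (V : PySem.Set (Int × Int)) :
    pvUnvis l V ≤ l.length := List.length_filter_le _ _

theorem pvFilterLt {α : Type} (p q : α → Bool) (h : ∀ a, q a = true → p a = true)
    {l : List α} {c : α} (hc : c ∈ l) (hq : q c = false) (hp : p c = true) :
    (l.filter q).length < (l.filter p).length := by
  suffices h2 : l.countP q < l.countP p by
    simpa [List.countP_eq_length_filter] using h2
  induction l with
  | nil => cases hc
  | cons a l ih =>
    simp only [List.countP_cons]
    have hmono : l.countP q ≤ l.countP p := List.countP_mono_left (fun x _ => h x)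
    rcases List.mem_cons.mp hc with rfl | hcl
    · rw [hq, hp]; simp; omega
    · have hstrict := ih hcl
      have h2 := h a
      cases hqa : q a <;> cases hpa : p a <;> simp_all

theorem pvContains_add_imp (V : PySem.Set (Int × Int)) (c x : Int × Int)
    (h : PySem.Set.contains V x = true) :
    PySem.Set.contains (PySem.Set.add V c) x = true := by
  rw [PySem.Set.contains_iff] at h ⊢
  exact (PySem.Set.mem_add V c x).mpr (Or.inl h)

theorem pvUnvis_add_lt {l : List (Int × Int)} {V : PySem.Set (Int × Int)} {c : Int × Int}
    (hc : c ∈ l) (hv : ¬ c ∈ V) : pvUnvis l (PySem.Set.add V c) < pvUnvis l V := by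
  refine pvFilterLt _ _ (fun a ha => ?_) hc ?_ ?_
  · cases hva : PySem.Set.contains V a
    · rfl
    · rw [pvContains_add_imp V c a hva] at ha
      cases ha
  · have : PySem.Set.contains (PySem.Set.add V c) c = true := by
      rw [PySem.Set.contains_iff]
      exact (PySem.Set.mem_add V c c).mpr (Or.inr rfl)
    rw [this]; rfl
  · cases hvc : PySem.Set.contains V c
    · rfl
    · exact absurd (PySem.Set.contains_iff V c |>.mp hvc) hv

theorem pvUnvis_append_le (l : List (Int × Int)) (V ext : PySem.Set (Int × Int)) :
    pvUnvis l (V ++ ext) ≤ pvUnvis l V := by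
  unfold pvUnvis
  rw [← List.countP_eq_length_filter, ← List.countP_eq_length_filter]
  refine List.countP_mono_left (fun x _ hx => ?_)
  cases hvx : PySem.Set.contains V x
  · rfl
  · exfalso
    have : x ∈ V ++ ext := List.mem_append_left _ ((PySem.Set.contains_iff V x).mp hvx)
    have h2 : PySem.Set.contains (V ++ ext) x = true := (PySem.Set.contains_iff _ x).mpr this
    rw [h2] at hx
    cases hx

theorem pvMem_keys_of_get? {D : PySem.Dict (Int × Int) String} {c : Int × Int} {v : String}
    (h : D.get? c = some v) : c ∈ D.keys :=
  PySem.Dict.mem_keys_of_mem_items D (PySem.Dict.mem_items_of_get?_eq_some D h)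

theorem pvKey_get? {D : PySem.Dict (Int × Int) String} {a : Int × Int}
    (h : D.contains a = true) : ∃ v, D.get? a = some v := by
  rw [PySem.Dict.contains_eq_isSome_get?] at h
  cases hv : D.get? a
  · rw [hv] at h; cases h
  · exact ⟨_, rfl⟩

theorem pvKeysLen (D : PySem.Dict (Int × Int) String) : D.keys.length = D.size := by
  simp [PySem.Dict.keys, PySem.Dict.size]

-- ---- the neighbour list is short (table of 8 slots) ----
theorem pvProbeIns_length (tbl : List (Option (Int × Int))) (c : Int × Int) :
    ∀ fuel i p, (pvProbeIns tbl c fuel i p).length = tbl.length := by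
  intro fuel
  induction fuel with
  | zero => intro i p; rfl
  | succ f ih =>
    intro i p
    rw [pvProbeIns]
    cases h : tbl.getD i.toNat none with
    | none => simp [List.length_set]
    | some _ => exact ih _ _

theorem pvFoldIns_length (l : List (Int × Int)) :
    ∀ tbl, (l.foldl pvInsertSlot tbl).length = tbl.length := by
  induction l with
  | nil => intro tbl; rfl
  | cons a l ih =>
    intro tbl
    rw [List.foldl_cons, ih]
    exact pvProbeIns_length tbl a 64 _ _

theorem pvAdj_length_le (c : Int × Int) : (pvAdj c).length ≤ 8 := by
  unfold pvAdj
  refine le_trans (List.length_filterMap_le _ _) ?_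
  rw [pvFoldIns_length]
  simp

-- ---- termination of A's recursion with the wrapper's fuel ----
theorem pvLoopA?_term (t : String) (D : PySem.Dict (Int × Int) String) :
    ∀ μ (adjs : List (Int × Int)) (C : PySem.Set (Int × Int)),
      10 * pvUnvis D.keys C + adjs.length ≤ μ →
      ∀ (nt : Bool) (f : Nat), 10 * pvUnvis D.keys C + adjs.length + 2 ≤ f →
      ∃ v C' ext, pvLoopA? f t D adjs nt C = some (v, C') ∧ C' = C ++ ext := by
  intro μ
  induction μ using Nat.strong_induction_on with
  | _ μ IH =>
    intro adjs C hμ nt f hf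
    obtain ⟨f0, rfl⟩ : ∃ k, f = k + 1 := ⟨f - 1, by omega⟩
    match adjs with
    | [] => exact ⟨nt, C, [], by rw [pvLoopA?], by simp⟩
    | a :: rest =>
      simp only [List.length_cons] at hμ hf
      rw [pvLoopA?]
      simp only
      by_cases hskip : (PySem.Set.contains C a || !(D.contains a)) = true
      · rw [if_pos hskip]
        exact IH (10 * pvUnvis D.keys C + rest.length) (by omega) rest C (le_refl _) nt f0
          (by omega)
      · rw [if_neg hskip]
        obtain ⟨hca, hka⟩ : PySem.Set.contains C a = false ∧ D.contains a = true := by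
          constructor
          · cases h : PySem.Set.contains C a
            · rfl
            · exact absurd (Bool.or_eq_true_iff.mpr (Or.inl h)) hskip
          · cases h : D.contains a
            · exact absurd (Bool.or_eq_true_iff.mpr (Or.inr (by rw [h]; rfl))) hskip
            · rfl
        have hnm : ¬ a ∈ C := fun hm => by
          rw [(PySem.Set.contains_iff C a).mpr hm] at hca; cases hca
        have hC2 : PySem.Set.add C a = C ++ [a] := PySem.Set.add_of_not_mem hnm
        obtain ⟨va, hget⟩ := pvKey_get? hka
        have hakey : a ∈ D.keys := pvMem_keys_of_get? hget
        have hu2 : pvUnvis D.keys (PySem.Set.add C a) < pvUnvis D.keys C :=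
          pvUnvis_add_lt hakey hnm
        by_cases h1 : (D.getD a "" == (if t == "farm" then "water" else "farm")) = true
        · rw [if_pos h1]
          exact ⟨false, _, [a], rfl, hC2⟩
        · rw [if_neg h1]
          by_cases h2 : (D.getD a "" == t) = true
          · rw [if_pos h2]
            by_cases hnt : nt = true
            · rw [hnt, if_pos rfl]
              obtain ⟨f1, rfl⟩ : ∃ k, f0 = k + 1 := ⟨f0 - 1, by omega⟩
              rw [pvCheckA?]
              by_cases hedge : (pvAdj a).length < 4
              · rw [if_pos hedge]
                simp only
                obtain ⟨v, C', ext, he, hext⟩ :=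
                  IH (10 * pvUnvis D.keys (PySem.Set.add C a) + rest.length) (by omega)
                    rest (PySem.Set.add C a) (le_refl _) false (f1 + 1) (by omega)
                exact ⟨v, C', [a] ++ ext, he,
                  by rw [hext, hC2, List.append_assoc]⟩
              · rw [if_neg hedge]
                have hlen8 := pvAdj_length_le a
                obtain ⟨vc, Cc, ext1, hec, hextc⟩ :=
                  IH (10 * pvUnvis D.keys (PySem.Set.add C a) + (pvAdj a).length)
                    (by omega) (pvAdj a) (PySem.Set.add C a) (le_refl _) true f1 (by omega)
                rw [hec]
                simp only
                have hu3 : pvUnvis D.keys Cc ≤ pvUnvis D.keys (PySem.Set.add C a) := by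
                  rw [hextc]; exact pvUnvis_append_le _ _ _
                obtain ⟨v, C', ext2, he, hext⟩ :=
                  IH (10 * pvUnvis D.keys Cc + rest.length) (by omega)
                    rest Cc (le_refl _) vc (f1 + 1) (by omega)
                exact ⟨v, C', [a] ++ (ext1 ++ ext2), he,
                  by rw [hext, hextc, hC2, List.append_assoc, List.append_assoc]⟩
            · rw [if_neg hnt]
              obtain ⟨v, C', ext, he, hext⟩ :=
                IH (10 * pvUnvis D.keys (PySem.Set.add C a) + rest.length) (by omega)
                  rest (PySem.Set.add C a) (le_refl _) nt f0 (by omega)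
              exact ⟨v, C', [a] ++ ext, he, by rw [hext, hC2, List.append_assoc]⟩
          · rw [if_neg h2]
            obtain ⟨v, C', ext, he, hext⟩ :=
              IH (10 * pvUnvis D.keys (PySem.Set.add C a) + rest.length) (by omega)
                rest (PySem.Set.add C a) (le_refl _) nt f0 (by omega)
            exact ⟨v, C', [a] ++ ext, he, by rw [hext, hC2, List.append_assoc]⟩

-- ---- termination of B's machine with the wrapper's fuel ----
def pvKLen (K : List (List (Int × Int))) : Nat := (K.map (fun l => l.length + 1)).sum

theorem pvKLen_nil : pvKLen [] = 0 := rfl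

theorem pvKLen_cons (p : List (Int × Int)) (K : List (List (Int × Int))) :
    pvKLen (p :: K) = p.length + 1 + pvKLen K := by
  simp only [pvKLen, List.map_cons, List.sum_cons]

theorem pvRunB?_term (t opp : String) (D : PySem.Dict (Int × Int) String) :
    ∀ μ (ts : List (Int × Int)) (ntb : Bool) (K : List (List (Int × Int)))
      (C : PySem.Set (Int × Int)),
      10 * pvUnvis D.keys C + ts.length + pvKLen K ≤ μ →
      ∀ f, 10 * pvUnvis D.keys C + ts.length + pvKLen K + 2 ≤ f →
      ∃ r, pvRunB? f t opp D (ts, ntb) K C = some r := by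
  intro μ
  induction μ using Nat.strong_induction_on with
  | _ μ IH =>
    intro ts ntb K C hμ f hf
    obtain ⟨f0, rfl⟩ : ∃ k, f = k + 1 := ⟨f - 1, by omega⟩
    match ts with
    | [] =>
      match K with
      | [] => exact ⟨(ntb, C), by rw [pvRunB?]⟩
      | p :: K' =>
        simp only [pvKLen_cons, List.length_nil] at hμ hf
        rw [pvRunB?]
        exact IH (10 * pvUnvis D.keys C + p.length + pvKLen K') (by omega)
          p ntb K' C (le_refl _) f0 (by omega)
    | a :: rest =>
      simp only [List.length_cons] at hμ hf
      rw [pvRunB?.eq_def]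
      simp only
      by_cases hskip : (PySem.Set.contains C a || !(D.contains a)) = true
      · rw [if_pos hskip]
        exact IH (10 * pvUnvis D.keys C + rest.length + pvKLen K) (by omega)
          rest ntb K C (le_refl _) f0 (by omega)
      · rw [if_neg hskip]
        obtain ⟨hca, hka⟩ : PySem.Set.contains C a = false ∧ D.contains a = true := by
          constructor
          · cases h : PySem.Set.contains C a
            · rfl
            · exact absurd (Bool.or_eq_true_iff.mpr (Or.inl h)) hskip
          · cases h : D.contains a
            · exact absurd (Bool.or_eq_true_iff.mpr (Or.inr (by rw [h]; rfl))) hskip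
            · rfl
        have hnm : ¬ a ∈ C := fun hm => by
          rw [(PySem.Set.contains_iff C a).mpr hm] at hca; cases hca
        obtain ⟨va, hget⟩ := pvKey_get? hka
        have hakey : a ∈ D.keys := pvMem_keys_of_get? hget
        have hu2 : pvUnvis D.keys (PySem.Set.add C a) < pvUnvis D.keys C :=
          pvUnvis_add_lt hakey hnm
        by_cases h1 : (D.getD a "" == opp) = true
        · rw [if_pos h1]
          match K with
          | [] => exact ⟨(false, PySem.Set.add C a), rfl⟩
          | p :: K' =>
            simp only [pvKLen_cons] at hμ hf
            exact IH (10 * pvUnvis D.keys (PySem.Set.add C a) + p.length + pvKLen K')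
              (by omega) p false K' (PySem.Set.add C a) (le_refl _) f0 (by omega)
        · rw [if_neg h1]
          by_cases h2 : (D.getD a "" == t && ntb) = true
          · rw [if_pos h2]
            by_cases hedge : (pvAdj a).length < 4
            · rw [if_pos hedge]
              exact IH (10 * pvUnvis D.keys (PySem.Set.add C a) + rest.length + pvKLen K)
                (by omega) rest false K (PySem.Set.add C a) (le_refl _) f0 (by omega)
            · rw [if_neg hedge]
              have hlen8 := pvAdj_length_le a
              exact IH (10 * pvUnvis D.keys (PySem.Set.add C a) + (pvAdj a).length +
                  pvKLen (rest :: K)) (by simp only [pvKLen_cons]; omega)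
                (pvAdj a) true (rest :: K) (PySem.Set.add C a)
                (le_refl _) f0
                (by show _ + 2 ≤ f0; simp only [pvKLen_cons]; omega)
          · rw [if_neg h2]
            exact IH (10 * pvUnvis D.keys (PySem.Set.add C a) + rest.length + pvKLen K)
              (by omega) rest ntb K (PySem.Set.add C a) (le_refl _) f0 (by omega)

-- ---- the machine result does not change once the fuel suffices ----
theorem pvRunB?_mono (t opp : String) (D : PySem.Dict (Int × Int) String) :
    ∀ f (ts : List (Int × Int)) (ntb : Bool) K C r,
      pvRunB? f t opp D (ts, ntb) K C = some r →
      ∀ g, f ≤ g → pvRunB? g t opp D (ts, ntb) K C = some r := by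
  intro f
  induction f with
  | zero =>
    intro ts ntb K C r h
    simp [pvRunB?] at h
  | succ f ih =>
    intro ts ntb K C r h g hg
    obtain ⟨g0, rfl⟩ : ∃ k, g = k + 1 := ⟨g - 1, by omega⟩
    match ts with
    | [] =>
      rw [pvRunB?.eq_def] at h
      rw [pvRunB?.eq_def]
      simp only at h ⊢
      match K with
      | [] => exact h
      | p :: K' => exact ih p ntb K' C r h g0 (by omega)
    | a :: rest =>
      rw [pvRunB?.eq_def] at h
      rw [pvRunB?.eq_def]
      simp only at h ⊢
      by_cases hskip : (PySem.Set.contains C a || !(D.contains a)) = true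
      · rw [if_pos hskip] at h ⊢
        exact ih rest ntb K C r h g0 (by omega)
      · rw [if_neg hskip] at h ⊢
        by_cases h1 : (D.getD a "" == opp) = true
        · rw [if_pos h1] at h ⊢
          match K with
          | [] => exact h
          | p :: K' => exact ih p false K' _ r h g0 (by omega)
        · rw [if_neg h1] at h ⊢
          by_cases h2 : (D.getD a "" == t && ntb) = true
          · rw [if_pos h2] at h ⊢
            by_cases hedge : (pvAdj a).length < 4
            · rw [if_pos hedge] at h ⊢
              exact ih rest false K _ r h g0 (by omega)
            · rw [if_neg hedge] at h ⊢
              exact ih (pvAdj a) true (rest :: K) _ r h g0 (by omega)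
          · rw [if_neg h2] at h ⊢
            exact ih rest ntb K _ r h g0 (by omega)

-- ---- simulation: the machine reaches exactly the value of A's recursion ----
def pvStepsTo (t opp : String) (D : PySem.Dict (Int × Int) String)
    (top : List (Int × Int) × Bool) (K : List (List (Int × Int)))
    (C : PySem.Set (Int × Int)) (r : Bool × PySem.Set (Int × Int)) : Prop :=
  ∃ g, pvRunB? g t opp D top K C = some r

def pvPopTo (t opp : String) (D : PySem.Dict (Int × Int) String)
    (K : List (List (Int × Int))) (v : Bool) (C : PySem.Set (Int × Int))
    (r : Bool × PySem.Set (Int × Int)) : Prop :=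
  match K with
  | [] => r = (v, C)
  | p :: K' => pvStepsTo t opp D (p, v) K' C r

theorem pvMain (t opp : String) (hopp : opp = (if t == "farm" then "water" else "farm"))
    (D : PySem.Dict (Int × Int) String) :
    ∀ f (adjs : List (Int × Int)) (nt : Bool) C v C',
      pvLoopA? f t D adjs nt C = some (v, C') →
      ∀ K r, pvPopTo t opp D K v C' r → pvStepsTo t opp D (adjs, nt) K C r := by
  intro f
  induction f using Nat.strong_induction_on with
  | _ f IH =>
    intro adjs nt C v C' hA K r hPop
    obtain ⟨f0, rfl⟩ : ∃ k, f = k + 1 := by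
      cases f with
      | zero => rw [pvLoopA?] at hA; cases hA
      | succ k => exact ⟨k, rfl⟩
    match adjs with
    | [] =>
      rw [pvLoopA?] at hA
      rw [Option.some.injEq, Prod.mk.injEq] at hA
      obtain ⟨rfl, rfl⟩ := hA
      match K with
      | [] =>
        rw [hPop]
        exact ⟨1, by rw [pvRunB?]⟩
      | p :: K' =>
        obtain ⟨g, hg⟩ := hPop
        exact ⟨g + 1, by rw [pvRunB?]; exact hg⟩
    | a :: rest =>
      rw [pvLoopA?.eq_def] at hA
      simp only at hA
      rw [← hopp] at hA
      by_cases hskip : (PySem.Set.contains C a || !(D.contains a)) = true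
      · rw [if_pos hskip] at hA
        obtain ⟨g, hg⟩ := IH f0 (by omega) rest nt C v C' hA K r hPop
        exact ⟨g + 1, by rw [pvRunB?.eq_def]; simp only; rw [if_pos hskip]; exact hg⟩
      · rw [if_neg hskip] at hA
        by_cases h1 : (D.getD a "" == opp) = true
        · rw [if_pos h1] at hA
          rw [Option.some.injEq, Prod.mk.injEq] at hA
          obtain ⟨rfl, rfl⟩ := hA
          match K with
          | [] =>
            rw [hPop]
            exact ⟨1, by rw [pvRunB?.eq_def]; simp only; rw [if_neg hskip, if_pos h1]⟩
          | p :: K' =>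
            obtain ⟨g, hg⟩ := hPop
            refine ⟨g + 1, ?_⟩
            rw [pvRunB?.eq_def]; simp only; rw [if_neg hskip, if_pos h1]; exact hg
        · rw [if_neg h1] at hA
          by_cases h2 : (D.getD a "" == t) = true
          · rw [if_pos h2] at hA
            cases nt with
            | true =>
              rw [if_pos rfl] at hA
              have hb2 : (D.getD a "" == t && true) = true := by rw [h2]; rfl
              cases hC : pvCheckA? f0 t D a (PySem.Set.add C a) with
              | none => rw [hC] at hA; cases hA
              | some p =>
                obtain ⟨vc, Cc⟩ := p
                rw [hC] at hA
                simp only at hA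
                have hCont := IH f0 (by omega) rest vc Cc v C' hA K r hPop
                obtain ⟨f1, rfl⟩ : ∃ k, f0 = k + 1 := by
                  cases f0 with
                  | zero => rw [pvCheckA?] at hC; cases hC
                  | succ k => exact ⟨k, rfl⟩
                rw [pvCheckA?] at hC
                by_cases hedge : (pvAdj a).length < 4
                · rw [if_pos hedge] at hC
                  rw [Option.some.injEq, Prod.mk.injEq] at hC
                  obtain ⟨hvc, hCc⟩ := hC
                  subst hvc; subst hCc
                  obtain ⟨g, hg⟩ := hCont
                  refine ⟨g + 1, ?_⟩
                  rw [pvRunB?.eq_def]; simp only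
                  rw [if_neg hskip, if_neg h1, if_pos hb2, if_pos hedge]; exact hg
                · rw [if_neg hedge] at hC
                  have hPush := IH f1 (by omega) (pvAdj a) true (PySem.Set.add C a) vc Cc hC
                    (rest :: K) r hCont
                  obtain ⟨g, hg⟩ := hPush
                  refine ⟨g + 1, ?_⟩
                  rw [pvRunB?.eq_def]; simp only
                  rw [if_neg hskip, if_neg h1, if_pos hb2, if_neg hedge]; exact hg
            | false =>
              rw [if_neg (by simp)] at hA
              have hb2 : (D.getD a "" == t && false) = false := by simp
              obtain ⟨g, hg⟩ := IH f0 (by omega) rest false (PySem.Set.add C a) v C' hA K r hPop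
              refine ⟨g + 1, ?_⟩
              rw [pvRunB?.eq_def]; simp only
              rw [if_neg hskip, if_neg h1, if_neg (by rw [hb2]; exact Bool.false_ne_true)]
              exact hg
          · rw [if_neg h2] at hA
            have hb2 : (D.getD a "" == t && nt) = false := by
              have h2f : (D.getD a "" == t) = false := by
                cases h : (D.getD a "" == t)
                · rfl
                · exact absurd h h2
              rw [h2f, Bool.false_and]
            obtain ⟨g, hg⟩ := IH f0 (by omega) rest nt (PySem.Set.add C a) v C' hA K r hPop
            refine ⟨g + 1, ?_⟩
            rw [pvRunB?.eq_def]; simp only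
            rw [if_neg hskip, if_neg h1, if_neg (by rw [hb2]; exact Bool.false_ne_true)]
            exact hg

-- ---- the two per-seed step functions agree ----
def pvStepA (t : String) (D : PySem.Dict (Int × Int) String)
    (st : Int × PySem.Set (Int × Int)) (seed : Int × Int) : Int × PySem.Set (Int × Int) :=
  if PySem.Set.contains st.2 seed then st
  else match pvCheckA? (10 * D.size + 20) t D seed st.2 with
       | none => st
       | some (v, c2) => (st.1 + (if v then 3 else 0), c2)

def pvStepB (t opp : String) (D : PySem.Dict (Int × Int) String)
    (st : Int × PySem.Set (Int × Int)) (seed : Int × Int) : Int × PySem.Set (Int × Int) :=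
  if PySem.Set.contains st.2 seed then st
  else
    let seed_nbrs := pvAdj seed
    if seed_nbrs.length < 4 then st
    else match pvRunB? (10 * D.size + 20) t opp D (seed_nbrs, true) [] st.2 with
         | none => st
         | some (v, c2) => (st.1 + (if v then 3 else 0), c2)

theorem pvStep_eq (t opp : String) (hopp : opp = (if t == "farm" then "water" else "farm"))
    (D : PySem.Dict (Int × Int) String) (st : Int × PySem.Set (Int × Int)) (seed : Int × Int) :
    pvStepA t D st seed = pvStepB t opp D st seed := by
  unfold pvStepA pvStepB
  by_cases hsk : PySem.Set.contains st.2 seed = true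
  · rw [if_pos hsk, if_pos hsk]
  · rw [if_neg hsk, if_neg hsk]
    simp only
    obtain ⟨F0, hF⟩ : ∃ k, 10 * D.size + 20 = k + 1 := ⟨10 * D.size + 19, by omega⟩
    rw [hF, pvCheckA?]
    by_cases hedge : (pvAdj seed).length < 4
    · rw [if_pos hedge, if_pos hedge]
      simp
    · rw [if_neg hedge, if_neg hedge]
      have hu := pvUnvis_le D.keys st.2
      have hk := pvKeysLen D
      have hlen8 := pvAdj_length_le seed
      obtain ⟨v, C', ext, he, _⟩ := pvLoopA?_term t D
        (10 * pvUnvis D.keys st.2 + (pvAdj seed).length) (pvAdj seed) st.2 (le_refl _)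
        true F0 (by omega)
      rw [he]
      obtain ⟨r, hr⟩ := pvRunB?_term t opp D
        (10 * pvUnvis D.keys st.2 + (pvAdj seed).length + pvKLen []) (pvAdj seed) true []
        st.2 (le_refl _) (F0 + 1) (by rw [pvKLen_nil]; omega)
      obtain ⟨g, hg⟩ := pvMain t opp hopp D F0 (pvAdj seed) true st.2 v C' he [] (v, C') rfl
      have h1 := pvRunB?_mono t opp D g (pvAdj seed) true [] st.2 (v, C') hg
        (g + (F0 + 1)) (by omega)
      have h2 := pvRunB?_mono t opp D (F0 + 1) (pvAdj seed) true [] st.2 r hr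
        (g + (F0 + 1)) (by omega)
      obtain rfl : r = (v, C') := by
        rw [h1] at h2
        exact (Option.some.inj h2).symm
      rw [hr]

theorem pvPhases_eq (t opp : String) (hopp : opp = (if t == "farm" then "water" else "farm"))
    (D : PySem.Dict (Int × Int) String) :
    ∀ (seeds : List (Int × Int)) (init : Int × PySem.Set (Int × Int)),
      seeds.foldl (pvStepA t D) init = seeds.foldl (pvStepB t opp D) init := by
  intro seeds
  induction seeds with
  | nil => intro init; rfl
  | cons s ss ih =>
    intro init
    rw [List.foldl_cons, List.foldl_cons, pvStep_eq t opp hopp D, ih]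

-- ===== VERDICT (by name: the statement is the Claim_ definition above) =====
theorem shoreside_expanse_spec : Claim_equal_shoreside_expanse := by
  intro cts ttc _hdom _hpre
  unfold Spec_shoreside_expanse
  have hw : ("farm" : String) = (if ("water" : String) == "farm" then "water" else "farm") := by
    decide
  have hf : ("water" : String) = (if ("farm" : String) == "farm" then "water" else "farm") := by
    decide
  show shoreside_expanse cts ttc = shoreside_expanse_alt cts ttc
  have hA : shoreside_expanse cts ttc =
    ((((PySem.Dict.ofList ttc : PySem.Dict String (List (Int × Int))).get? "farm").getD []).foldl
      (pvStepA "farm" (pvCoordDict cts))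
      (((((PySem.Dict.ofList ttc : PySem.Dict String (List (Int × Int))).get? "water").getD
          []).foldl
        (pvStepA "water" (pvCoordDict cts)) (0, PySem.Set.empty)).1, PySem.Set.empty)).1 := rfl
  have hB : shoreside_expanse_alt cts ttc =
    ((((PySem.Dict.ofList ttc : PySem.Dict String (List (Int × Int))).get? "farm").getD []).foldl
      (pvStepB "farm" "water" (pvCoordDict cts))
      (((((PySem.Dict.ofList ttc : PySem.Dict String (List (Int × Int))).get? "water").getD
          []).foldl
        (pvStepB "water" "farm" (pvCoordDict cts)) (0, PySem.Set.empty)).1,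
        PySem.Set.empty)).1 := rfl
  rw [hA, hB, pvPhases_eq "water" "farm" hw (pvCoordDict cts),
    pvPhases_eq "farm" "water" hf (pvCoordDict cts)]
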